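-- pv_equiv track=rewrite | github.com/sojiomiwade/supreme-train | prefix-pairs.py | find_prefix_pairs
-- ===== SOURCE A (Python) =====
-- from typing import Dict, List,Tuple
-- from collections import defaultdict
--
-- def build_trie(words: List[str]) -> Dict:
--     root={}
--     for word in words:
--         cur=root
--         for let in word:
--             if let not in cur:
--                 cur[let]={}
--             cur=cur[let]
--         cur[None]=word
--     return root
--
-- def findpairs(root: Dict, asclist: List[str],desclist_map):
--     if None in root:
--         curword=root[None]
--         for asc in asclist:
--             desclist_map[asc].append(curword)
--         asclist.append(curword)
--     for let in root:
--         if let is not None: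
--             findpairs(root[let],asclist,desclist_map)
--     if None in root:
--         asclist.pop()
--
-- def find_prefix_pairs(words: List[str]) -> List[Tuple[str,str]]:
--     root=build_trie(words)
--     # printtrie(root)
--     desc=defaultdict(list)
--     ans=[]
--     findpairs(root,[],desc)
--     for word,desclist in desc.items():
--         ans.extend([(word,descword) for descword in desclist])
--     return ans
-- ===== SOURCE B (Python) =====
-- from typing import Dict, List, Tuple
--
-- def build_trie(words: List[str]) -> Dict:
--     root = {}
--     for word in words:
--         cur = root
--         for let in word:
--             if let not in cur:
--                 cur[let] = {}
--             cur = cur[let]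
--         cur[None] = word
--     return root
--
-- def find_prefix_pairs(words: List[str]) -> List[Tuple[str, str]]:
--     # Upward data flow: each subtree RETURNS its word list in pre-order;
--     # a word node reserves its group before recursing (to keep A's group order)
--     # and stores its subtree's words as its descendants afterwards.
--     root = build_trie(words)
--     groups = {}
--
--     def collect(node):
--         selfword = node[None] if None in node else None
--         if selfword is not None:
--             groups[selfword] = []          # reserve the group slot in pre-order
--         desc = []
--         for let, child in node.items():
--             if let is not None:
--                 desc += collect(child)
--         if selfword is not None:
--             groups[selfword] = desc        # descendants = words strictly below
--             return [selfword] + desc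
--         return desc
--
--     collect(root)
--     return [(word, d) for word, desclist in groups.items() for d in desclist]
-- ===== Notes on version B (the rewrite author's own statement) =====
-- stated objective: alternative
-- what changed: The downward ancestor-accumulator DFS (threading a mutable ancestor stack and appending the current word to every ancestor's group) is replaced by an upward subtree-returning DFS: each recursive call returns its subtree's word list in pre-order, a word node reserves its group slot on entry and stores the returned descendant list after visiting its children.
import Mathlib
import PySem

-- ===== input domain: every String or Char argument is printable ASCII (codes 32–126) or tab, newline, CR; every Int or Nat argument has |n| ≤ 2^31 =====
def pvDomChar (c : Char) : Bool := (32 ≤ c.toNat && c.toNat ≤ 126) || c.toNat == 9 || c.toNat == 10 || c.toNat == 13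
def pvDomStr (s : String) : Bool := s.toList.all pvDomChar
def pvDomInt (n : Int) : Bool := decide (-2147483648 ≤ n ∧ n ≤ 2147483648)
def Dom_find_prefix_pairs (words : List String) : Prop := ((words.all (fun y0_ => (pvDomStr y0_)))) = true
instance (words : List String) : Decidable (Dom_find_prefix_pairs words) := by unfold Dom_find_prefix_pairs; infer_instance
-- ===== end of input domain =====

-- B replaces A's downward ancestor-accumulator DFS by an upward subtree-returning DFS
-- (each call returns its subtree's words; a word node reserves its group on entry and
-- stores the returned descendants afterwards); objective: alternative decomposition.

-- ===== PORT A =====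
-- The Python dict trie is represented as a node holding the optional `None`-key word
-- and the letter children in insertion order (the position of the `None` key among the
-- letters is irrelevant: both traversals test it separately and skip it).
mutual
inductive Trie where
  | mk : Option String → Children → Trie
inductive Children where
  | nil : Children
  | cons : Char → Trie → Children → Children
end

-- shared helper `build_trie` (identical in Source A and Source B): the inner `for let in word`
-- descent-with-mutation becomes recursion on the remaining letters.
mutual
def insertW : Trie → List Char → String → Trie
  | .mk _ ch, [], w => .mk (some w) ch
  | .mk w? ch, c :: cs, w => .mk w? (insertChild ch c cs w)
  termination_by t cs _ => (cs.length, 0, sizeOf t)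
def insertChild : Children → Char → List Char → String → Children
  | .nil, c, cs, w => .cons c (insertW (.mk none .nil) cs w) .nil
  | .cons c' t rest, c, cs, w =>
      if c' = c then .cons c' (insertW t cs w) rest
      else .cons c' t (insertChild rest c cs w)
  termination_by ch _ cs _ => (cs.length, 1, sizeOf ch)
end

def build_trie (words : List String) : Trie :=
  words.foldl (fun t w => insertW t w.toList w) (.mk none .nil)

-- findpairs: asclist is threaded downward; the trailing `.pop()` restores asclist, which
-- in this pure port is automatic (the extended list is only passed to the children).
mutual
def findpairsT : Trie → List String → PySem.Dict String (List String) → PySem.Dict String (List String)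
  | .mk (some w) ch, ascl, d =>
      findpairsC ch (ascl ++ [w]) (ascl.foldl (fun d asc => d.modify asc [] (· ++ [w])) d)
  | .mk none ch, ascl, d => findpairsC ch ascl d
def findpairsC : Children → List String → PySem.Dict String (List String) → PySem.Dict String (List String)
  | .nil, _, d => d
  | .cons _ t rest, ascl, d => findpairsC rest ascl (findpairsT t ascl d)
end

def find_prefix_pairs (words : List String) : List (String × String) :=
  let root := build_trie words
  let desc := findpairsT root [] PySem.Dict.empty
  desc.items.foldl (fun ans p => ans ++ p.2.map (fun dw => (p.1, dw))) []

-- ===== PORT B =====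
-- collect returns (pre-order word list of the subtree, updated groups dict).
mutual
def collectT : Trie → PySem.Dict String (List String) → List String × PySem.Dict String (List String)
  | .mk (some w) ch, g =>
      let r := collectC ch (g.insert w [])
      (w :: r.1, r.2.insert w r.1)
  | .mk none ch, g => collectC ch g
def collectC : Children → PySem.Dict String (List String) → List String × PySem.Dict String (List String)
  | .nil, g => ([], g)
  | .cons _ t rest, g =>
      let r1 := collectT t g
      let r2 := collectC rest r1.2
      (r1.1 ++ r2.1, r2.2)
end

def find_prefix_pairs_alt (words : List String) : List (String × String) :=
  let root := build_trie words
  let g := (collectT root PySem.Dict.empty).2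
  g.items.flatMap (fun p => p.2.map (fun dw => (p.1, dw)))

-- ===== PRECONDITION & SPEC =====
def Spec_find_prefix_pairs (words : List String) (out : List (String × String)) : Prop := out = find_prefix_pairs_alt words
instance (words : List String) (out : List (String × String)) : Decidable (Spec_find_prefix_pairs words out) := by unfold Spec_find_prefix_pairs; infer_instance

-- ===== CLAIM (what is proved, stated in full; the proofs are below) =====
def Claim_equal_find_prefix_pairs : Prop := ∀ (words : List String), Dom_find_prefix_pairs words → Spec_find_prefix_pairs words (find_prefix_pairs words)

-- ===== LEMMAS AND PROOFS =====

-- pre-order word list of a subtree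
mutual
def preW : Trie → List String
  | .mk (some w) ch => w :: preWC ch
  | .mk none ch => preWC ch
def preWC : Children → List String
  | .nil => []
  | .cons _ t r => preW t ++ preWC r
end

-- canonical grouping: each word node with its strict descendants, in pre-order
mutual
def grp : Trie → List (String × List String)
  | .mk (some w) ch => (w, preWC ch) :: grpC ch
  | .mk none ch => grpC ch
def grpC : Children → List (String × List String)
  | .nil => []
  | .cons _ t r => grp t ++ grpC r
end

def grpNE (t : Trie) : List (String × List String) := (grp t).filter (fun p => !p.2.isEmpty)
def grpNEC (ch : Children) : List (String × List String) := (grpC ch).filter (fun p => !p.2.isEmpty)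

def flattenG (l : List (String × List String)) : List (String × String) :=
  l.flatMap (fun p => p.2.map (fun dw => (p.1, dw)))

def mapApp (xs : List (String × List String)) (S : List String) (ws : List String) :
    List (String × List String) :=
  xs.map (fun p => if p.1 ∈ S then (p.1, p.2 ++ ws) else p)

-- well-formedness of tries built by build_trie
def lettersC : Children → List Char
  | .nil => []
  | .cons c _ r => c :: lettersC r

mutual
def WFT (pfx : List Char) : Trie → Prop
  | .mk w? ch => (∀ w, w? = some w → w.toList = pfx) ∧ WFC pfx ch
def WFC (pfx : List Char) : Children → Prop
  | .nil => True
  | .cons c t r => WFT (pfx ++ [c]) t ∧ WFC pfx r ∧ c ∉ lettersC r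
end

theorem letters_insertChild (ch : Children) (c : Char) (cs : List Char) (w : String) :
    ∀ x ∈ lettersC (insertChild ch c cs w), x ∈ lettersC ch ∨ x = c := by
  cases ch with
  | nil => simp [insertChild, lettersC]
  | cons c' t rest =>
      by_cases h : c' = c
      · simp [insertChild, h, lettersC]; tauto
      · simp only [insertChild, if_neg h, lettersC, List.mem_cons]
        intro x hx
        rcases hx with rfl | hx
        · tauto
        · rcases letters_insertChild rest c cs w x hx with h' | h' <;> tauto

mutual
theorem wf_insertW (pfx : List Char) (t : Trie) (cs : List Char) (w : String)
    (hw : w.toList = pfx ++ cs) (h : WFT pfx t) : WFT pfx (insertW t cs w) := by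
  cases t with
  | mk w? ch =>
    cases cs with
    | nil =>
        simp only [insertW, WFT]
        exact ⟨by intro v hv; cases hv; simpa using hw, h.2⟩
    | cons c cs' =>
        simp only [insertW, WFT]
        exact ⟨h.1, wf_insertChild pfx ch c cs' w (by simpa using hw) h.2⟩
theorem wf_insertChild (pfx : List Char) (ch : Children) (c : Char) (cs : List Char) (w : String)
    (hw : w.toList = pfx ++ c :: cs) (h : WFC pfx ch) : WFC pfx (insertChild ch c cs w) := by
  cases ch with
  | nil =>
      simp only [insertChild, WFC, lettersC]
      refine ⟨wf_insertW (pfx ++ [c]) (.mk none .nil) cs w (by simpa using hw) ?_, trivial, by simp⟩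
      exact ⟨by simp, trivial⟩
  | cons c' t rest =>
      by_cases hc : c' = c
      · subst hc
        simp only [insertChild, if_pos rfl]
        exact ⟨wf_insertW (pfx ++ [c']) t cs w (by simpa using hw) h.1, h.2.1, h.2.2⟩
      · simp only [insertChild, if_neg hc, WFC]
        refine ⟨h.1, wf_insertChild pfx rest c cs w hw h.2.1, ?_⟩
        intro hmem
        rcases letters_insertChild rest c cs w c' hmem with h' | h'
        · exact h.2.2 h'
        · exact hc h' 
end

theorem wf_build_trie (words : List String) : WFT [] (build_trie words) := by
  have key : ∀ (l : List String) (t : Trie), WFT [] t →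
      WFT [] (l.foldl (fun t w => insertW t w.toList w) t) := by
    intro l
    induction l with
    | nil => intro t h; exact h
    | cons w rest ih =>
        intro t h
        exact ih _ (wf_insertW [] t w.toList w (by simp) h)
  exact key words (.mk none .nil) ⟨by simp, trivial⟩

mutual
theorem preW_prefix (pfx : List Char) (t : Trie) (h : WFT pfx t) :
    ∀ w ∈ preW t, pfx <+: w.toList := by
  cases t with
  | mk w? ch =>
    simp only [WFT] at h
    cases w? with
    | some v =>
        simp only [preW, List.mem_cons]
        intro w hw
        rcases hw with rfl | hw
        · exact (h.1 w rfl) ▸ List.prefix_refl _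
        · obtain ⟨c, _, hp⟩ := preWC_prefix pfx ch h.2 w hw
          exact (pfx.prefix_append [c]).trans hp
    | none =>
        intro w hw
        simp only [preW] at hw
        obtain ⟨c, _, hp⟩ := preWC_prefix pfx ch h.2 w hw
        exact (pfx.prefix_append [c]).trans hp
theorem preWC_prefix (pfx : List Char) (ch : Children) (h : WFC pfx ch) :
    ∀ w ∈ preWC ch, ∃ c ∈ lettersC ch, (pfx ++ [c]) <+: w.toList := by
  cases ch with
  | nil => simp [preWC]
  | cons c t r =>
      simp only [WFC] at h
      intro w hw
      simp only [preWC, List.mem_append] at hw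
      rcases hw with hw | hw
      · exact ⟨c, by simp [lettersC], preW_prefix (pfx ++ [c]) t h.1 w hw⟩
      · obtain ⟨c', hc', hp⟩ := preWC_prefix pfx r h.2.1 w hw
        exact ⟨c', by simp [lettersC, hc'], hp⟩
end

mutual
theorem nodup_preW (pfx : List Char) (t : Trie) (h : WFT pfx t) : (preW t).Nodup := by
  cases t with
  | mk w? ch =>
    simp only [WFT] at h
    cases w? with
    | some v =>
        simp only [preW, List.nodup_cons]
        refine ⟨?_, nodup_preWC pfx ch h.2⟩
        intro hmem
        obtain ⟨c, _, hp⟩ := preWC_prefix pfx ch h.2 v hmem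
        have hlen := hp.length_le
        rw [h.1 v rfl] at hlen
        simp at hlen
    | none => exact nodup_preWC pfx ch h.2
theorem nodup_preWC (pfx : List Char) (ch : Children) (h : WFC pfx ch) : (preWC ch).Nodup := by
  cases ch with
  | nil => simp [preWC]
  | cons c t r =>
      simp only [WFC] at h
      simp only [preWC]
      refine List.Nodup.append (nodup_preW (pfx ++ [c]) t h.1) (nodup_preWC pfx r h.2.1) ?_
      intro w hw1 hw2
      have hp1 := preW_prefix (pfx ++ [c]) t h.1 w hw1
      obtain ⟨c', hc', hp2⟩ := preWC_prefix pfx r h.2.1 w hw2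
      have e1 : pfx ++ [c] = w.toList.take (pfx ++ [c]).length := List.prefix_iff_eq_take.mp hp1
      have e2 : pfx ++ [c'] = w.toList.take (pfx ++ [c']).length := List.prefix_iff_eq_take.mp hp2
      have : pfx ++ [c] = pfx ++ [c'] := by
        rw [e1, e2]; simp
      have : c = c' := by simpa using this
      exact h.2.2 (this ▸ hc')
end

mutual
theorem grp_nil (t : Trie) (h : preW t = []) : grp t = [] := by
  cases t with
  | mk w? ch =>
    cases w? with
    | some v => simp [preW] at h
    | none => exact grpC_nil ch h
theorem grpC_nil (ch : Children) (h : preWC ch = []) : grpC ch = [] := by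
  cases ch with
  | nil => rfl
  | cons c t r =>
      simp only [preWC, List.append_eq_nil_iff] at h
      simp only [grpC, grp_nil t h.1, grpC_nil r h.2, List.append_nil]
end

mutual
theorem keys_grp (t : Trie) : ((grp t).map Prod.fst).Sublist (preW t) := by
  cases t with
  | mk w? ch =>
    cases w? with
    | some v => simpa [grp, preW] using (keys_grpC ch).cons₂ v
    | none => exact keys_grpC ch
theorem keys_grpC (ch : Children) : ((grpC ch).map Prod.fst).Sublist (preWC ch) := by
  cases ch with
  | nil => simp [grpC, preWC]
  | cons c t r =>
      simpa [grpC, preWC] using (keys_grp t).append (keys_grpC r)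
end

-- ===== B side =====
mutual
theorem collect_fst (t : Trie) (g : PySem.Dict String (List String)) :
    (collectT t g).1 = preW t := by
  cases t with
  | mk w? ch =>
    cases w? with
    | some v => simp only [collectT, preW, collect_fstC]
    | none => simp only [collectT, preW, collect_fstC]
theorem collect_fstC (ch : Children) (g : PySem.Dict String (List String)) :
    (collectC ch g).1 = preWC ch := by
  cases ch with
  | nil => rfl
  | cons c t r => simp only [collectC, preWC, collect_fst, collect_fstC]
end

mutual
theorem collect_snd (t : Trie) (g : PySem.Dict String (List String))
    (hnd : (preW t).Nodup) (hfresh : ∀ w ∈ preW t, w ∉ g.items.map Prod.fst) :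
    (collectT t g).2.items = g.items ++ grp t := by
  cases t with
  | mk w? ch =>
    cases w? with
    | some v =>
        simp only [collectT, grp]
        have hv : v ∉ g.items.map Prod.fst := hfresh v (by simp [preW])
        have hcg : g.contains v = false := by
          rw [PySem.Dict.contains_eq_decide_mem_keys]
          simpa [PySem.Dict.keys] using hv
        have h_ins : (g.insert v ([] : List String)).items = g.items ++ [(v, [])] :=
          PySem.Dict.items_insert_of_not_contains _ _ hcg
        have hnd' : (preWC ch).Nodup := by
          simp only [preW, List.nodup_cons] at hnd; exact hnd.2
        have hvnot : v ∉ preWC ch := by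
          simp only [preW, List.nodup_cons] at hnd; exact hnd.1
        have hfresh' : ∀ w ∈ preWC ch, w ∉ (g.insert v ([] : List String)).items.map Prod.fst := by
          intro w hw
          rw [h_ins]
          simp only [List.map_append, List.mem_append, List.map_cons, List.map_nil,
            List.mem_cons, List.not_mem_nil, or_false]
          rintro (h1 | h1)
          · exact hfresh w (by simp [preW, hw]) h1
          · exact hvnot (h1 ▸ hw)
        have hc2 := collect_sndC ch (g.insert v ([] : List String)) hnd' hfresh'
        rw [h_ins] at hc2
        have hcont : (collectC ch (g.insert v ([] : List String))).2.contains v = true := by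
          rw [PySem.Dict.contains_eq_decide_mem_keys]
          simp only [PySem.Dict.keys, hc2]
          simp
        rw [PySem.Dict.items_insert_of_contains _ _ hcont, hc2, collect_fstC]
        simp only [List.map_append]
        have e1 : g.items.map (fun p => if (p.1 == v) = true then (v, preWC ch) else p)
            = g.items := by
          rw [List.map_congr_left (g := id) ?_, List.map_id]
          intro p hp
          have : p.1 ≠ v := fun h => hv (h ▸ List.mem_map_of_mem hp)
          simp [this]
        have e3 : (grpC ch).map (fun p => if (p.1 == v) = true then (v, preWC ch) else p)
            = grpC ch := by
          rw [List.map_congr_left (g := id) ?_, List.map_id]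
          intro p hp
          have hpk : p.1 ∈ preWC ch := (keys_grpC ch).mem (List.mem_map_of_mem hp)
          have : p.1 ≠ v := fun h => hvnot (h ▸ hpk)
          simp [this]
        rw [e1, e3]
        simp
    | none =>
        simp only [collectT, grp]
        exact collect_sndC ch g (by simpa [preW] using hnd) (by simpa [preW] using hfresh)
theorem collect_sndC (ch : Children) (g : PySem.Dict String (List String))
    (hnd : (preWC ch).Nodup) (hfresh : ∀ w ∈ preWC ch, w ∉ g.items.map Prod.fst) :
    (collectC ch g).2.items = g.items ++ grpC ch := by
  cases ch with
  | nil => simp [collectC, grpC]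
  | cons c t rest =>
      simp only [collectC, grpC]
      simp only [preWC] at hnd hfresh
      have nd1 : (preW t).Nodup := hnd.of_append_left
      have nd2 : (preWC rest).Nodup := hnd.of_append_right
      have hdisj : ∀ w ∈ preW t, w ∉ preWC rest := by
        intro w h1 h2
        exact (List.disjoint_of_nodup_append hnd) h1 h2
      have h1 := collect_snd t g nd1 (fun w hw => hfresh w (by simp [hw]))
      have hfresh2 : ∀ w ∈ preWC rest, w ∉ (collectT t g).2.items.map Prod.fst := by
        intro w hw
        rw [h1]
        simp only [List.map_append, List.mem_append]
        rintro (ha | ha)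
        · exact hfresh w (by simp [hw]) ha
        · exact hdisj w ((keys_grp t).mem ha) hw
      have h2 := collect_sndC rest (collectT t g).2 nd2 hfresh2
      rw [h2, h1, List.append_assoc]
end

-- ===== A side =====
theorem keys_mapApp (xs : List (String × List String)) (S ws : List String) :
    (mapApp xs S ws).map Prod.fst = xs.map Prod.fst := by
  simp only [mapApp, List.map_map]
  refine List.map_congr_left ?_
  intro p _
  by_cases h : p.1 ∈ S <;> simp [h]

theorem mapApp_append (xs ys : List (String × List String)) (S ws : List String) :
    mapApp (xs ++ ys) S ws = mapApp xs S ws ++ mapApp ys S ws := by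
  simp [mapApp]

theorem mapApp_id (xs : List (String × List String)) (S ws : List String)
    (h : ∀ p ∈ xs, p.1 ∉ S) : mapApp xs S ws = xs := by
  unfold mapApp
  rw [List.map_congr_left (g := id) ?_, List.map_id]
  intro p hp
  simp [h p hp]

theorem mapApp_mapApp (xs : List (String × List String)) (S S' ws ws' : List String)
    (h : ∀ p ∈ xs, p.1 ∈ S ↔ p.1 ∈ S') :
    mapApp (mapApp xs S ws) S' ws' = mapApp xs S (ws ++ ws') := by
  unfold mapApp
  rw [List.map_map]
  refine List.map_congr_left ?_
  intro p hp
  by_cases hS : p.1 ∈ S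
  · simp [hS, (h p hp).mp hS]
  · have hS' : p.1 ∉ S' := fun hS' => hS ((h p hp).mpr hS')
    simp [hS, hS']

theorem mapApp_pairs (l : List String) (vs : List String) (S ws : List String)
    (h : ∀ a ∈ l, a ∈ S) :
    mapApp (l.map (fun a => (a, vs))) S ws = l.map (fun a => (a, vs ++ ws)) := by
  unfold mapApp
  rw [List.map_map]
  refine List.map_congr_left ?_
  intro a ha
  simp [h a ha]

theorem foldl_modify_present (w : String) (l : List String) (d : PySem.Dict String (List String))
    (hk : (d.items.map Prod.fst).Nodup) (hl : ∀ a ∈ l, a ∈ d.items.map Prod.fst)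
    (hnd : l.Nodup) :
    (l.foldl (fun d a => d.modify a [] (· ++ [w])) d).items
      = mapApp d.items l [w] := by
  unfold mapApp
  induction l generalizing d with
  | nil =>
      simp only [List.foldl_nil, List.not_mem_nil, if_false]
      rw [List.map_congr_left (g := id) (by intro p _; simp), List.map_id]
  | cons a l ih =>
      simp only [List.foldl_cons]
      have hca : d.contains a = true := by
        rw [PySem.Dict.contains_eq_decide_mem_keys]
        simpa [PySem.Dict.keys] using hl a (by simp)
      have hmod : (d.modify a [] (· ++ [w])).items
          = d.items.map (fun p => if p.1 = a then (p.1, p.2 ++ [w]) else p) := by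
        rw [PySem.Dict.modify, PySem.Dict.items_insert_of_contains _ _ hca]
        refine List.map_congr_left ?_
        intro p hp
        by_cases hpa : p.1 = a
        · have : d.getD a [] = p.2 := by
            refine PySem.Dict.getD_of_mem_items d ?_ ?_ []
            · rw [← hpa]; exact hp
            · simpa [PySem.Dict.keys] using hk
          simp [hpa, this]
        · simp [hpa]
      have hk' : ((d.modify a [] (· ++ [w])).items.map Prod.fst).Nodup := by
        rw [hmod, List.map_map]
        have : (Prod.fst ∘ fun p : String × List String =>
            if p.1 = a then (p.1, p.2 ++ [w]) else p) = Prod.fst := by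
          funext p; by_cases hpa : p.1 = a <;> simp [hpa]
        rw [this]; exact hk
      have hl' : ∀ b ∈ l, b ∈ (d.modify a [] (· ++ [w])).items.map Prod.fst := by
        intro b hb
        rw [hmod, List.map_map]
        have : (Prod.fst ∘ fun p : String × List String =>
            if p.1 = a then (p.1, p.2 ++ [w]) else p) = Prod.fst := by
          funext p; by_cases hpa : p.1 = a <;> simp [hpa]
        rw [this]; exact hl b (by simp [hb])
      rw [ih _ hk' hl' hnd.of_cons, hmod, List.map_map]
      refine List.map_congr_left ?_
      intro p hp
      have hanl : a ∉ l := by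
        have := List.nodup_cons.mp hnd
        exact this.1
      by_cases h1 : p.1 = a
      · simp [h1, hanl]
      · by_cases h2 : p.1 ∈ l <;> simp [h1, h2]

theorem foldl_modify_fresh (w : String) (l : List String) (d : PySem.Dict String (List String))
    (hl : ∀ a ∈ l, a ∉ d.items.map Prod.fst) (hnd : l.Nodup) :
    (l.foldl (fun d a => d.modify a [] (· ++ [w])) d).items
      = d.items ++ l.map (fun a => (a, [w])) := by
  induction l generalizing d with
  | nil => simp
  | cons a l ih =>
      simp only [List.foldl_cons]
      have hca : d.contains a = false := by
        rw [PySem.Dict.contains_eq_decide_mem_keys]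
        simpa [PySem.Dict.keys] using hl a (by simp)
      have hmod : (d.modify a [] (· ++ [w])).items = d.items ++ [(a, [w])] := by
        rw [PySem.Dict.modify, PySem.Dict.getD_of_not_contains _ _ hca,
          PySem.Dict.items_insert_of_not_contains _ _ hca]
        simp
      have hl' : ∀ b ∈ l, b ∉ (d.modify a [] (· ++ [w])).items.map Prod.fst := by
        intro b hb
        rw [hmod]
        simp only [List.map_append, List.mem_append, List.map_cons, List.map_nil]
        rintro (h1 | h1)
        · exact hl b (by simp [hb]) h1
        · have hba : b = a := by simpa using h1
          exact (List.nodup_cons.mp hnd).1 (hba ▸ hb)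
      rw [ih _ hl' hnd.of_cons, hmod]
      simp

theorem keys_grpNE (t : Trie) : ((grpNE t).map Prod.fst).Sublist (preW t) :=
  (((grp t).filter_sublist).map Prod.fst).trans (keys_grp t)

mutual
theorem findT_items (t : Trie) (ascl₁ ascl₂ : List String) (d : PySem.Dict String (List String))
    (H0 : (d.items.map Prod.fst).Nodup)
    (H1 : ∀ a ∈ ascl₁, a ∈ d.items.map Prod.fst)
    (H2 : ∀ a ∈ ascl₂, a ∉ d.items.map Prod.fst)
    (H3 : ∀ w ∈ preW t, w ∉ d.items.map Prod.fst ∧ w ∉ ascl₁ ∧ w ∉ ascl₂)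
    (H4 : (preW t).Nodup) (H5 : ascl₂.Nodup) (H6 : ascl₁.Nodup)
    (H7 : ∀ a ∈ ascl₁, a ∉ ascl₂) :
    (findpairsT t (ascl₁ ++ ascl₂) d).items =
      if preW t = [] then d.items
      else mapApp d.items ascl₁ (preW t) ++ ascl₂.map (fun a => (a, preW t)) ++ grpNE t := by
  cases t with
  | mk w? ch =>
    cases w? with
    | none =>
        simp only [findpairsT, preW, grpNE, grp] at *
        exact findC_items ch ascl₁ ascl₂ d H0 H1 H2 H3 H4 H5 H6 H7
    | some v =>
        simp only [findpairsT, preW] at *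
        have hv := H3 v (by simp)
        have hvch : v ∉ preWC ch := (List.nodup_cons.mp H4).1
        rw [List.foldl_append]
        have hA := foldl_modify_present v ascl₁ d H0 H1 H6
        have K1 : (ascl₁.foldl (fun d a => d.modify a [] (· ++ [v])) d).items.map Prod.fst
            = d.items.map Prod.fst := by
          rw [hA]; exact keys_mapApp d.items ascl₁ [v]
        have hB := foldl_modify_fresh v ascl₂ (ascl₁.foldl (fun d a => d.modify a [] (· ++ [v])) d)
          (by intro a ha; rw [K1]; exact H2 a ha) H5
        rw [hA] at hB
        set dm := ascl₂.foldl (fun d a => d.modify a [] (· ++ [v]))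
          (ascl₁.foldl (fun d a => d.modify a [] (· ++ [v])) d) with hdm
        have Km : dm.items.map Prod.fst = d.items.map Prod.fst ++ ascl₂ := by
          rw [hB, List.map_append, keys_mapApp]
          simp [List.map_map, Function.comp_def]
        have H0' : (dm.items.map Prod.fst).Nodup := by
          rw [Km]
          exact List.Nodup.append H0 H5 (fun a ha hb => H2 a hb ha)
        have H1' : ∀ a ∈ ascl₁ ++ ascl₂, a ∈ dm.items.map Prod.fst := by
          intro a ha
          rw [Km]
          rcases List.mem_append.mp ha with h | h
          · exact List.mem_append_left _ (H1 a h)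
          · exact List.mem_append_right _ h
        have H2' : ∀ a ∈ ([v] : List String), a ∉ dm.items.map Prod.fst := by
          intro a ha
          have : a = v := by simpa using ha
          subst this
          rw [Km]
          simp only [List.mem_append, not_or]
          exact ⟨hv.1, hv.2.2⟩
        have H3' : ∀ w ∈ preWC ch, w ∉ dm.items.map Prod.fst ∧ w ∉ ascl₁ ++ ascl₂ ∧ w ∉ ([v] : List String) := by
          intro w hw
          have h3 := H3 w (by simp [hw])
          refine ⟨?_, by simp [h3.2.1, h3.2.2], ?_⟩
          swap
          · intro hm
            have hwv : w = v := by simpa using hm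
            exact hvch (by rwa [hwv] at hw)
          rw [Km]
          simp only [List.mem_append, not_or]
          exact ⟨h3.1, h3.2.2⟩
        have H6' : (ascl₁ ++ ascl₂).Nodup := List.Nodup.append H6 H5 H7
        have H7' : ∀ a ∈ ascl₁ ++ ascl₂, a ∉ ([v] : List String) := by
          intro a ha hmem
          have hav : a = v := by simpa using hmem
          subst hav
          rcases List.mem_append.mp ha with h | h
          · exact hv.2.1 h
          · exact hv.2.2 h
        have hrec := findC_items ch (ascl₁ ++ ascl₂) [v] dm H0' H1' H2' H3'
          (List.nodup_cons.mp H4).2 (by simp) H6' H7'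
        rw [hrec]
        by_cases hch : preWC ch = []
        · rw [if_pos hch, hB, if_neg (by simp)]
          have hgrp : grpNE (.mk (some v) ch) = [] := by
            simp [grpNE, grp, grpC_nil ch hch, List.filter_cons, hch]
          rw [hgrp, hch]
          simp [mapApp]
        · rw [if_neg hch, if_neg (by simp), hB, mapApp_append]
          have b1 : mapApp (mapApp d.items ascl₁ [v]) (ascl₁ ++ ascl₂) (preWC ch)
              = mapApp d.items ascl₁ ([v] ++ preWC ch) := by
            refine mapApp_mapApp _ _ _ _ _ ?_
            intro p hp
            constructor
            · intro h; exact List.mem_append_left _ h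
            · intro h
              rcases List.mem_append.mp h with h | h
              · exact h
              · exact absurd (List.mem_map_of_mem hp) (H2 p.1 h)
          have b2 : mapApp (ascl₂.map (fun a => (a, [v]))) (ascl₁ ++ ascl₂) (preWC ch)
              = ascl₂.map (fun a => (a, [v] ++ preWC ch)) := by
            refine mapApp_pairs _ _ _ _ ?_
            intro a ha; exact List.mem_append_right _ ha
          have hgrp : grpNE (.mk (some v) ch) = (v, preWC ch) :: grpNEC ch := by
            simp only [grpNE, grp, List.filter_cons, grpNEC]
            rw [if_pos (by simpa [List.isEmpty_iff] using hch)]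
          rw [b1, b2, hgrp]
          simp [List.append_assoc]

theorem findC_items (ch : Children) (ascl₁ ascl₂ : List String) (d : PySem.Dict String (List String))
    (H0 : (d.items.map Prod.fst).Nodup)
    (H1 : ∀ a ∈ ascl₁, a ∈ d.items.map Prod.fst)
    (H2 : ∀ a ∈ ascl₂, a ∉ d.items.map Prod.fst)
    (H3 : ∀ w ∈ preWC ch, w ∉ d.items.map Prod.fst ∧ w ∉ ascl₁ ∧ w ∉ ascl₂)
    (H4 : (preWC ch).Nodup) (H5 : ascl₂.Nodup) (H6 : ascl₁.Nodup)
    (H7 : ∀ a ∈ ascl₁, a ∉ ascl₂) :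
    (findpairsC ch (ascl₁ ++ ascl₂) d).items =
      if preWC ch = [] then d.items
      else mapApp d.items ascl₁ (preWC ch) ++ ascl₂.map (fun a => (a, preWC ch)) ++ grpNEC ch := by
  cases ch with
  | nil => simp [findpairsC, preWC]
  | cons c t rest =>
      simp only [findpairsC, preWC] at *
      have nd1 : (preW t).Nodup := H4.of_append_left
      have nd2 : (preWC rest).Nodup := H4.of_append_right
      have hdisj : ∀ w ∈ preW t, w ∉ preWC rest := fun w h1 h2 =>
        (List.disjoint_of_nodup_append H4) h1 h2
      have h1 := findT_items t ascl₁ ascl₂ d H0 H1 H2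
        (fun w hw => H3 w (by simp [hw])) nd1 H5 H6 H7
      set d' := findpairsT t (ascl₁ ++ ascl₂) d with hd'
      by_cases hpt : preW t = []
      · rw [if_pos hpt] at h1
        have hgt : grpNE t = [] := by simp [grpNE, grp_nil t hpt]
        have hrec := findC_items rest ascl₁ ascl₂ d'
          (by rw [h1]; exact H0) (by rw [h1]; exact H1) (by rw [h1]; exact H2)
          (by rw [h1]; exact fun w hw => H3 w (by simp [hw])) nd2 H5 H6 H7
        have hgc : grpNEC (Children.cons c t rest) = grpNEC rest := by
          simp [grpNEC, grpC, grp_nil t hpt]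
        rw [hrec, h1, hpt, hgc]
        simp
      · rw [if_neg hpt] at h1
        have hne : ¬ (preW t ++ preWC rest = []) := by simp [hpt]
        have Kd' : d'.items.map Prod.fst
            = d.items.map Prod.fst ++ ascl₂ ++ (grpNE t).map Prod.fst := by
          rw [h1, List.map_append, List.map_append, keys_mapApp]
          simp [List.map_map, Function.comp_def]
        have hsubNE : ∀ x ∈ (grpNE t).map Prod.fst, x ∈ preW t :=
          fun x hx => (keys_grpNE t).mem hx
        have H0' : (d'.items.map Prod.fst).Nodup := by
          rw [Kd']
          refine List.Nodup.append (List.Nodup.append H0 H5 (fun a ha hb => H2 a hb ha)) ?_ ?_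
          · exact nd1.sublist (keys_grpNE t)
          · intro a ha hb
            have hpa : a ∈ preW t := hsubNE a hb
            rcases List.mem_append.mp ha with h | h
            · exact (H3 a (by simp [hpa])).1 h
            · exact (H3 a (by simp [hpa])).2.2 h
        have H1' : ∀ a ∈ ascl₁ ++ ascl₂, a ∈ d'.items.map Prod.fst := by
          intro a ha
          rw [Kd']
          rcases List.mem_append.mp ha with h | h
          · exact List.mem_append_left _ (List.mem_append_left _ (H1 a h))
          · exact List.mem_append_left _ (List.mem_append_right _ h)
        have H3' : ∀ w ∈ preWC rest, w ∉ d'.items.map Prod.fst ∧ w ∉ ascl₁ ++ ascl₂ ∧ w ∉ ([] : List String) := by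
          intro w hw
          have h3 := H3 w (by simp [hw])
          refine ⟨?_, by simp [h3.2.1, h3.2.2], by simp⟩
          rw [Kd']
          simp only [List.mem_append, not_or]
          exact ⟨⟨h3.1, h3.2.2⟩, fun hb => hdisj w (hsubNE w hb) hw⟩
        have H6' : (ascl₁ ++ ascl₂).Nodup := List.Nodup.append H6 H5 H7
        have hrec := findC_items rest (ascl₁ ++ ascl₂) [] d'
          H0' H1' (by simp) H3' nd2 (by simp) H6' (by simp)
        rw [List.append_nil] at hrec
        rw [hrec]
        by_cases hpr : preWC rest = []
        · rw [if_pos hpr, if_neg hne, h1]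
          have hgc2 : grpNEC (Children.cons c t rest) = grpNE t := by
            simp [grpNEC, grpNE, grpC, List.filter_append, grpC_nil rest hpr]
          rw [hgc2, hpr]
          simp
        · rw [if_neg hpr, if_neg hne, h1]
          rw [mapApp_append, mapApp_append]
          have b1 : mapApp (mapApp d.items ascl₁ (preW t)) (ascl₁ ++ ascl₂) (preWC rest)
              = mapApp d.items ascl₁ (preW t ++ preWC rest) := by
            refine mapApp_mapApp _ _ _ _ _ ?_
            intro p hp
            constructor
            · intro h; exact List.mem_append_left _ h
            · intro h
              rcases List.mem_append.mp h with h | h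
              · exact h
              · exact absurd (List.mem_map_of_mem hp) (H2 p.1 h)
          have b2 : mapApp (ascl₂.map (fun a => (a, preW t))) (ascl₁ ++ ascl₂) (preWC rest)
              = ascl₂.map (fun a => (a, preW t ++ preWC rest)) := by
            refine mapApp_pairs _ _ _ _ ?_
            intro a ha; exact List.mem_append_right _ ha
          have b3 : mapApp (grpNE t) (ascl₁ ++ ascl₂) (preWC rest) = grpNE t := by
            refine mapApp_id _ _ _ ?_
            intro p hp hmem
            have hpa : p.1 ∈ preW t := hsubNE p.1 (List.mem_map_of_mem hp)
            rcases List.mem_append.mp hmem with h | h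
            · exact (H3 p.1 (by simp [hpa])).1 (H1 p.1 h)
            · exact (H3 p.1 (by simp [hpa])).2.2 h
          rw [b1, b2, b3]
          have : grpNEC (.cons c t rest) = grpNE t ++ grpNEC rest := by
            simp [grpNEC, grpC, grpNE, List.filter_append]
          simp only [grpNEC, grpC, List.filter_append] at *
          simp [grpNE, List.append_assoc]
end

theorem foldl_extend (l : List (String × List String)) (init : List (String × String)) :
    l.foldl (fun ans p => ans ++ p.2.map (fun dw => (p.1, dw))) init = init ++ flattenG l := by
  induction l generalizing init with
  | nil => simp [flattenG]
  | cons p l ih => simp [List.foldl_cons, ih, flattenG]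

theorem flattenG_filter (l : List (String × List String)) :
    flattenG (l.filter (fun p => !p.2.isEmpty)) = flattenG l := by
  induction l with
  | nil => rfl
  | cons p l ih =>
      by_cases h : p.2.isEmpty = true
      · have hnil : p.2 = [] := by simpa [List.isEmpty_iff] using h
        simp only [flattenG, List.filter_cons, h, Bool.not_true, List.flatMap_cons, hnil,
          List.map_nil, List.nil_append] at ih ⊢
        exact ih
      · simp only [flattenG, List.filter_cons] at ih ⊢
        rw [if_pos (by simpa using h)]
        simp only [List.flatMap_cons, ih]

-- ===== VERDICT (by name: the statement is the Claim_ definition above) =====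
theorem find_prefix_pairs_spec : Claim_equal_find_prefix_pairs := by
  intro words _
  unfold Spec_find_prefix_pairs find_prefix_pairs find_prefix_pairs_alt
  have hw := wf_build_trie words
  have hnd : (preW (build_trie words)).Nodup := nodup_preW [] (build_trie words) hw
  have hA := findT_items (build_trie words) [] [] PySem.Dict.empty
    (by simp [PySem.Dict.empty]) (by simp) (by simp)
    (fun w _ => ⟨by simp [PySem.Dict.empty], by simp, by simp⟩) hnd (by simp) (by simp) (by simp)
  simp only [List.nil_append] at hA
  have hAitems : (findpairsT (build_trie words) [] PySem.Dict.empty).items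
      = grpNE (build_trie words) := by
    rw [hA]
    by_cases h : preW (build_trie words) = []
    · rw [if_pos h]
      simp [PySem.Dict.empty, grpNE, grp_nil (build_trie words) h]
    · rw [if_neg h]
      simp [PySem.Dict.empty, mapApp]
  have hB := collect_snd (build_trie words) PySem.Dict.empty hnd (by simp [PySem.Dict.empty])
  rw [foldl_extend, hAitems]
  show [] ++ flattenG (grpNE (build_trie words))
      = ((collectT (build_trie words) PySem.Dict.empty).2).items.flatMap
          (fun p => p.2.map (fun dw => (p.1, dw)))
  rw [hB]
  simp only [PySem.Dict.empty, List.nil_append]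
  simpa [flattenG, grpNE] using flattenG_filter (grp (build_trie words))
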